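-- pv_equiv track=rewrite | github.com/jb-23/meterdraw | meterdraw.py | string_escape
-- ===== SOURCE A (Python) =====
-- def string_escape(string):
--     q = ""
--     esc = False
--     for c in string:
--         if esc:
--             if c == '`': q += c
--             elif c == 'n': q += chr(10)  # newline
--             elif c == 'u': q += chr(128) # micro
--             elif c == 'R': q += chr(129) # omega
--             elif c == '-': q += chr(130) # hyphen
--             elif c == '.': q += chr(131) # interpunct
--             elif c == '~': q += chr(132) # AC
--             elif c == '=': q += chr(133) # DC
--             else: q += '`' + c
--             esc = False
--             continue
--         if c == '`':
--             esc = True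
--             continue
--         q += c
--     return q
-- ===== SOURCE B (Python) =====
-- def string_escape(string):
--     mapping = {'`': '`', 'n': chr(10), 'u': chr(128), 'R': chr(129),
--                '-': chr(130), '.': chr(131), '~': chr(132), '=': chr(133)}
--     parts = iter(string.split('`'))
--     out = [next(parts)]
--     for p in parts:
--         if p:
--             out.append(mapping.get(p[0], '`' + p[0]) + p[1:])
--         else:
--             nxt = next(parts, None)
--             if nxt is None:
--                 break  # string ended with a lone backtick: it is dropped
--             out.append('`' + nxt)
--     return ''.join(out)
-- ===== Notes on version B (the rewrite author's own statement) =====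
-- stated objective: idiomatic
-- what changed: Replaces A's per-character boolean escape-flag state machine with split-on-backtick, a mapping dict looked up on each fragment's first character, and a join.
import Mathlib
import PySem

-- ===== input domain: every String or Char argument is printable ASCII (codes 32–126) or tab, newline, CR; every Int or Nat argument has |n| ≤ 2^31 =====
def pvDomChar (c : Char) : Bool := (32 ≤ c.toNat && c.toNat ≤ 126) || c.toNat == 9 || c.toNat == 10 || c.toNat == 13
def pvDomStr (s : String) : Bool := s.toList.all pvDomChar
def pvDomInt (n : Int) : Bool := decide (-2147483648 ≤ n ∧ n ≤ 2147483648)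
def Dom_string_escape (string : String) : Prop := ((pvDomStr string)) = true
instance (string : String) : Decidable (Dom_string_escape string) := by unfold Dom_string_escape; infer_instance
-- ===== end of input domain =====

-- B replaces A's per-character boolean escape-flag state machine by split-on-backtick +
-- table lookup on each fragment's first character + join (objective: idiomatic).

-- ===== PORT A =====
-- the body of A's for-loop: state is (q, esc)
def stepA (st : List Char × Bool) (c : Char) : List Char × Bool :=
  if st.2 then
    (st.1 ++
      (if c = '`' then [c]
       else if c = 'n' then [Char.ofNat 10]
       else if c = 'u' then [Char.ofNat 128]
       else if c = 'R' then [Char.ofNat 129]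
       else if c = '-' then [Char.ofNat 130]
       else if c = '.' then [Char.ofNat 131]
       else if c = '~' then [Char.ofNat 132]
       else if c = '=' then [Char.ofNat 133]
       else '`' :: [c]), false)
  else if c = '`' then (st.1, true)
  else (st.1 ++ [c], false)

def string_escape (string : String) : String :=
  String.mk (string.toList.foldl stepA ([], false)).1

-- ===== PORT B =====
-- B's mapping dict
def mappingB : PySem.Dict Char (List Char) :=
  PySem.Dict.ofList
    [('`', ['`']), ('n', [Char.ofNat 10]), ('u', [Char.ofNat 128]), ('R', [Char.ofNat 129]),
     ('-', [Char.ofNat 130]), ('.', [Char.ofNat 131]), ('~', [Char.ofNat 132]), ('=', [Char.ofNat 133])]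

-- B's for-loop over the iterator of the remaining parts, collecting the `out` pieces
def bGo : List (List Char) → List (List Char)
  | [] => []
  | (c :: cs) :: rest => (PySem.Dict.getD mappingB c ('`' :: [c]) ++ cs) :: bGo rest
  | [] :: rest =>
    match rest with
    | [] => []                                  -- next(parts, None) is None: break
    | nxt :: rest' => ('`' :: nxt) :: bGo rest'

def string_escape_alt (string : String) : String :=
  let parts := string.toList.splitOn '`'        -- string.split('`')
  String.mk (parts.headI ++ (bGo parts.tail).flatten)   -- out[0] = next(parts); ''.join(out)

-- ===== PRECONDITION & SPEC =====
def Spec_string_escape (string : String) (out : String) : Prop := out = string_escape_alt string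
instance (string : String) (out : String) : Decidable (Spec_string_escape string out) := by unfold Spec_string_escape; infer_instance

-- ===== CLAIM (what is proved, stated in full; the proofs are below) =====
def Claim_equal_string_escape : Prop := ∀ (string : String), Dom_string_escape string → Spec_string_escape string (string_escape string)

-- ===== LEMMAS AND PROOFS =====

-- direct semantics of the escape scan, the common reference point of both proofs
def sGo : List Char → List Char
  | [] => []
  | c :: cs =>
    if c = '`' then
      match cs with
      | [] => []
      | d :: cs' => PySem.Dict.getD mappingB d ('`' :: [d]) ++ sGo cs'
    else c :: sGo cs

-- A's elif chain computes exactly B's mapping.get(c, '`'+c)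
lemma chainA_eq_rep (c : Char) :
    (if c = '`' then [c]
     else if c = 'n' then [Char.ofNat 10]
     else if c = 'u' then [Char.ofNat 128]
     else if c = 'R' then [Char.ofNat 129]
     else if c = '-' then [Char.ofNat 130]
     else if c = '.' then [Char.ofNat 131]
     else if c = '~' then [Char.ofNat 132]
     else if c = '=' then [Char.ofNat 133]
     else '`' :: [c]) = PySem.Dict.getD mappingB c ('`' :: [c]) := by
  split_ifs with h1 h2 h3 h4 h5 h6 h7 h8
  · subst h1; decide
  · subst h2; decide
  · subst h3; decide
  · subst h4; decide
  · subst h5; decide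
  · subst h6; decide
  · subst h7; decide
  · subst h8; decide
  · have hm : mappingB = PySem.Dict.mk
        [('`', ['`']), ('n', [Char.ofNat 10]), ('u', [Char.ofNat 128]), ('R', [Char.ofNat 129]),
         ('-', [Char.ofNat 130]), ('.', [Char.ofNat 131]), ('~', [Char.ofNat 132]), ('=', [Char.ofNat 133])] := by
      decide
    simp [hm, PySem.Dict.getD_eq_get?_getD, PySem.Dict.get?_mk_cons, beq_iff_eq,
      Ne.symm h1, Ne.symm h2, Ne.symm h3, Ne.symm h4, Ne.symm h5, Ne.symm h6,
      Ne.symm h7, Ne.symm h8]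
    rfl

-- unfolding equations of sGo used by both directions
lemma sGo_cons_ne (c : Char) (cs : List Char) (hc : c ≠ '`') : sGo (c :: cs) = c :: sGo cs := by
  rw [sGo.eq_def]; simp [hc]

lemma sGo_cons_tick (d : Char) (cs' : List Char) :
    sGo ('`' :: d :: cs') = PySem.Dict.getD mappingB d ('`' :: [d]) ++ sGo cs' := by
  rw [sGo.eq_def]; simp

-- A's fold equals the direct semantics (with a pending '`' when esc is set)
lemma foldA_eq_sGo (cs : List Char) : ∀ (q : List Char) (esc : Bool),
    (cs.foldl stepA (q, esc)).1 = q ++ sGo (if esc then '`' :: cs else cs) := by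
  induction cs with
  | nil => intro q esc; cases esc <;> simp [sGo]
  | cons c cs ih =>
    intro q esc
    cases esc with
    | false =>
      by_cases hc : c = '`'
      · subst hc; simp [stepA, ih, sGo]
      · simp [stepA, hc, ih, sGo_cons_ne _ _ hc]
    | true =>
      rw [List.foldl_cons]
      have hstep : stepA (q, true) c = (q ++ PySem.Dict.getD mappingB c ('`' :: [c]), false) := by
        rw [stepA, if_pos rfl, chainA_eq_rep]
      rw [hstep, ih]
      simp [sGo, List.append_assoc]

-- B's split-then-rebuild equals the direct semantics
lemma bGo_split_eq_sGo (l : List Char) :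
    (l.splitOn '`').headI ++ (bGo (l.splitOn '`').tail).flatten = sGo l := by
  induction l using sGo.induct with
  | case1 => simp [List.splitOn, bGo, sGo]
  | case2 => simp [List.splitOn, List.splitOnP_cons, bGo, sGo]
  | case3 d cs' ih =>
    obtain ⟨f, r, hfr⟩ : ∃ f r, cs'.splitOnP (· == '`') = f :: r := by
      rcases h : cs'.splitOnP (· == '`') with _ | ⟨f, r⟩
      · exact absurd h (List.splitOnP_ne_nil _ _)
      · exact ⟨f, r, rfl⟩
    simp only [List.splitOn, hfr] at ih
    by_cases hd : d = '`'
    · subst hd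
      have hg : PySem.Dict.getD mappingB '`' ('`' :: ['`']) = ['`'] := by decide
      rw [sGo_cons_tick, hg, ← ih]
      simp [List.splitOn, List.splitOnP_cons, hfr, bGo]
    · rw [sGo_cons_tick, ← ih]
      simp [List.splitOn, List.splitOnP_cons, hd, hfr, bGo]
  | case4 d cs' hd ih =>
    obtain ⟨f, r, hfr⟩ : ∃ f r, cs'.splitOnP (· == '`') = f :: r := by
      rcases h : cs'.splitOnP (· == '`') with _ | ⟨f, r⟩
      · exact absurd h (List.splitOnP_ne_nil _ _)
      · exact ⟨f, r, rfl⟩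
    simp only [List.splitOn, hfr] at ih
    rw [sGo_cons_ne _ _ hd, ← ih]
    simp [List.splitOn, List.splitOnP_cons, hd, hfr]

-- ===== VERDICT (by name: the statement is the Claim_ definition above) =====
theorem string_escape_spec : Claim_equal_string_escape := by
  intro s _
  unfold Spec_string_escape string_escape string_escape_alt
  rw [foldA_eq_sGo, ← bGo_split_eq_sGo]
  simp
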